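-- pv_equiv track=rewrite | github.com/kylehench/Python-Public | algo-practice/110_strings_rearrangement.py | solution
-- ===== SOURCE A (Python) =====
-- def solution(inputArray):
--   def one_diff(a, b):
--     # returns True if there is exactly 1 difference between two equal-length strings
--     return sum(i!=j for i, j in zip(a, b)) == 1
--
--   def arrange(arr, pool):
--     if not pool:
--       # successful case if pool has been depleted
--       return True
--     for item in pool:
--       # see whether each item in pool can succeed the last item in arr. If so, make a copy of arr and pool, and recursively call arrange on modified copies.
--       if one_diff(arr[-1], item):
--         arr_new = arr.copy() + [item]
--         pool_new = pool.copy()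
--         pool_new.remove(item)
--         if arrange(arr_new, pool_new):
--           return True
--     return False
--
--
--   return any(arrange([inputArray[i]], inputArray[0:i]+inputArray[i+1:]) for i in range(len(inputArray)))
-- ===== SOURCE B (Python) =====
-- def solution(inputArray):
--   # Subset DP (memoized) over (last index, remaining index set) instead of A's
--   # factorial backtracking over list copies.
--   from functools import lru_cache
--   n = len(inputArray)
--   adj = [[sum(x != y for x, y in zip(a, b)) == 1 for b in inputArray] for a in inputArray]
--
--   @lru_cache(maxsize=None)
--   def reach(last, rest):
--     # rest: ascending tuple of still-unused indices
--     if not rest: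
--       return True
--     return any(adj[last][j] and reach(j, tuple(k for k in rest if k != j)) for j in rest)
--
--   return any(reach(i, tuple(k for k in range(n) if k != i)) for i in range(n))
-- ===== Notes on version B (the rewrite author's own statement) =====
-- stated objective: faster
-- what changed: Replaces A's factorial backtracking over copied string lists with a memoized subset DP over (last index, remaining index tuple) using a precomputed one-difference adjacency matrix.
import Mathlib
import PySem

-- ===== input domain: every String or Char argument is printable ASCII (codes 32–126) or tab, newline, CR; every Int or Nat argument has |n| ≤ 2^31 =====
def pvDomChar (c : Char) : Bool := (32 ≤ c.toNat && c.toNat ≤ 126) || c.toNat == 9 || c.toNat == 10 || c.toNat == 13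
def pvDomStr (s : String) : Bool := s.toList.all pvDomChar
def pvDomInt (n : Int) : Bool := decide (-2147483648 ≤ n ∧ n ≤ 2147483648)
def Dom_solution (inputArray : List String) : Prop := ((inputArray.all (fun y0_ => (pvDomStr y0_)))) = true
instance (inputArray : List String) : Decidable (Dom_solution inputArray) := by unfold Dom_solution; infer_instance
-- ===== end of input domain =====

-- B replaces A's factorial backtracking over list copies by a memoized subset DP over
-- (last index, remaining index tuple) with a precomputed one-difference adjacency table
-- (objective: faster; the Lean port of B transcribes the memoized recursion as plain recursion,
-- which computes the same values).

-- ===== PORT A =====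
-- sum(i!=j for i,j in zip a b) == 1  (a 0/1-sum is a countP)
def pvOneDiff (a b : String) : Bool :=
  ((a.toList.zip b.toList).countP (fun p => p.1 ≠ p.2)) == 1

-- A's recursive arrange; arr[-1] is PySem.List.pyGet? arr (-1) (always some: arr is never
-- empty in A's calls, so the .getD "" default is unreachable); pool.remove(item) is
-- PySem.List.remove? (always some: item ∈ pool).
def pvArrange (arr : List String) (pool : List String) : Bool :=
  if pool.isEmpty then true
  else pool.attach.any (fun item =>
    if pvOneDiff ((PySem.List.pyGet? arr (-1)).getD "") item.1 then
      pvArrange (arr ++ [item.1]) ((PySem.List.remove? pool item.1).getD [])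
    else false)
termination_by pool.length
decreasing_by
  have h1 := PySem.List.remove?_eq_some_erase pool _ item.2
  rw [h1]
  have h2 := List.length_erase_add_one item.2
  simp
  omega

def solution (inputArray : List String) : Bool :=
  (List.range inputArray.length).any (fun i =>
    pvArrange [(PySem.List.pyGet? inputArray (i : Int)).getD ""]
      (PySem.List.slice inputArray (some 0) (some (i : Int)) ++
       PySem.List.slice inputArray (some ((i : Int) + 1)) none))

-- ===== PORT B =====
def altOneDiff (a b : String) : Bool :=
  ((a.toList.zip b.toList).countP (fun p => p.1 ≠ p.2)) == 1

-- B's reach(last, rest): rest is the tuple of still-unused indices;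
-- tuple(k for k in rest if k != j) is rest.filter (· ≠ j).
def altReach (adj : List (List Bool)) (last : Nat) (rest : List Nat) : Bool :=
  if rest.isEmpty then true
  else rest.attach.any (fun j =>
    if (adj.getD last []).getD j.1 false then
      altReach adj j.1 (rest.filter (fun k => k ≠ j.1))
    else false)
termination_by rest.length
decreasing_by
  have h : (List.filter (fun x => decide (x.1 ≠ j.1)) rest.attach).length < rest.attach.length :=
    List.length_filter_lt_length_iff_exists.mpr ⟨j, List.mem_attach _ _, by simp⟩
  simpa using h

def solution_alt (inputArray : List String) : Bool :=
  let n := inputArray.length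
  let adj := inputArray.map (fun a => inputArray.map (fun b => altOneDiff a b))
  (List.range n).any (fun i =>
    altReach adj i ((List.range n).filter (fun k => k ≠ i)))

-- ===== PRECONDITION & SPEC =====
def Spec_solution (inputArray : List String) (out : Bool) : Prop := out = solution_alt inputArray
instance (inputArray : List String) (out : Bool) : Decidable (Spec_solution inputArray out) := by unfold Spec_solution; infer_instance

-- ===== CLAIM (what is proved, stated in full; the proofs are below) =====
def Claim_equal_solution : Prop := ∀ (inputArray : List String), Dom_solution inputArray → Spec_solution inputArray (solution inputArray)

-- ===== LEMMAS AND PROOFS =====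

-- both programs ask: can pool be ordered into a one-diff chain starting after x?
def Chainable (x : String) (pool : List String) : Prop :=
  ∃ l, pool.Perm l ∧ List.IsChain (fun a b => pvOneDiff a b = true) (x :: l)

theorem chainable_perm {x : String} {p q : List String} (h : p.Perm q) :
    Chainable x p ↔ Chainable x q := by
  constructor <;> rintro ⟨l, hl, hc⟩
  · exact ⟨l, h.symm.trans hl, hc⟩
  · exact ⟨l, h.trans hl, hc⟩

theorem chainable_nil (x : String) : Chainable x [] := ⟨[], List.Perm.refl _, List.isChain_singleton x⟩

theorem chainable_iff_step (x : String) (pool : List String) (hne : pool ≠ []) :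
    Chainable x pool ↔ ∃ y ∈ pool, pvOneDiff x y = true ∧ Chainable y (pool.erase y) := by
  constructor
  · rintro ⟨l, hl, hc⟩
    cases l with
    | nil => exact absurd (List.Perm.eq_nil hl) hne
    | cons y l' =>
      obtain ⟨hxy, hcy⟩ := (List.isChain_cons_cons).mp hc
      have hy : y ∈ pool := hl.mem_iff.mpr (List.mem_cons_self ..)
      refine ⟨y, hy, hxy, l', ?_, hcy⟩
      have := hl.erase y
      simpa using this
  · rintro ⟨y, hy, hxy, l', hl', hcy⟩
    exact ⟨y :: l', (List.perm_cons_erase hy).trans (hl'.cons y),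
      (List.isChain_cons_cons).mpr ⟨hxy, hcy⟩⟩

-- A's arrange decides Chainable (of arr's last element)
theorem arrange_iff_aux : ∀ (n : Nat) (pool : List String), pool.length ≤ n →
    ∀ (arr : List String) (x : String),
    PySem.List.pyGet? arr (-1) = some x →
    (pvArrange arr pool = true ↔ Chainable x pool) := by
  intro n
  induction n with
  | zero =>
    intro pool hlen arr x hx
    have : pool = [] := List.length_eq_zero_iff.mp (Nat.le_zero.mp hlen)
    subst this
    rw [pvArrange.eq_def]
    simp [chainable_nil]
  | succ n IH =>
    intro pool hlen arr x hx
    rw [pvArrange.eq_def]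
    by_cases hemp : pool.isEmpty
    · simp [List.isEmpty_iff.mp hemp, chainable_nil]
    · have hne : pool ≠ [] := by simpa [List.isEmpty_iff] using hemp
      rw [if_neg hemp, chainable_iff_step x pool hne]
      rw [List.any_eq_true]
      constructor
      · rintro ⟨⟨item, hmem⟩, -, hval⟩
        simp only [hx, Option.getD_some] at hval
        by_cases hod : pvOneDiff x item = true
        · rw [if_pos hod, PySem.List.remove?_eq_some_erase pool item hmem, Option.getD_some] at hval
          refine ⟨item, hmem, hod, ?_⟩
          have hle : (pool.erase item).length ≤ n := by
            have := List.length_erase_add_one hmem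
            omega
          exact (IH (pool.erase item) hle
            (arr ++ [item]) item (PySem.List.pyGet?_neg_one_append_singleton ..)).mp hval
        · rw [if_neg hod] at hval; exact absurd hval (by simp)
      · rintro ⟨y, hy, hxy, hch⟩
        refine ⟨⟨y, hy⟩, List.mem_attach _ _, ?_⟩
        simp only [hx, Option.getD_some]
        rw [if_pos hxy, PySem.List.remove?_eq_some_erase pool y hy, Option.getD_some]
        have hle : (pool.erase y).length ≤ n := by
          have := List.length_erase_add_one hy
          omega
        exact (IH (pool.erase y) hle
          (arr ++ [y]) y (PySem.List.pyGet?_neg_one_append_singleton ..)).mpr hch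

theorem arrange_iff (pool arr : List String) (x : String)
    (hx : PySem.List.pyGet? arr (-1) = some x) :
    pvArrange arr pool = true ↔ Chainable x pool :=
  arrange_iff_aux pool.length pool le_rfl arr x hx

-- B's reach decides Chainable of the indexed strings
theorem adj_entry (inputArray : List String) (i j : Nat)
    (hi : i < inputArray.length) (hj : j < inputArray.length) :
    (((inputArray.map (fun a => inputArray.map (fun b => altOneDiff a b))).getD i []).getD j false)
      = pvOneDiff (inputArray.getD i "") (inputArray.getD j "") := by
  rw [List.getD_eq_getElem?_getD, List.getD_eq_getElem?_getD, List.getD_eq_getElem?_getD]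
  simp [hi, hj, altOneDiff, pvOneDiff]

theorem filter_ne_eq_erase {l : List Nat} (hnd : l.Nodup) (j : Nat) (hj : j ∈ l) :
    l.filter (fun k => k ≠ j) = l.erase j := by
  induction l with
  | nil => rfl
  | cons a l ih =>
    rcases List.nodup_cons.mp hnd with ⟨ha, hl⟩
    by_cases haj : a = j
    · subst haj
      rw [List.filter_cons, if_neg (by simp), List.erase_cons_head]
      exact List.filter_eq_self.mpr (fun b hb => by simp; rintro rfl; exact ha hb)
    · rw [List.filter_cons, if_pos (by simpa using haj), List.erase_cons_tail (by simpa using haj)]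
      rcases List.mem_cons.mp hj with rfl | hj'
      · exact absurd rfl haj
      · rw [ih hl hj']

theorem reach_iff (inputArray : List String) :
    ∀ (rest : List Nat), rest.Nodup → (∀ k ∈ rest, k < inputArray.length) →
    ∀ last, last < inputArray.length →
    (altReach (inputArray.map (fun a => inputArray.map (fun b => altOneDiff a b))) last rest = true
      ↔ Chainable (inputArray.getD last "") (rest.map (fun k => inputArray.getD k ""))) := by
  suffices H : ∀ (n : Nat) (rest : List Nat), rest.length ≤ n → rest.Nodup →
      (∀ k ∈ rest, k < inputArray.length) → ∀ last, last < inputArray.length →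
      (altReach (inputArray.map (fun a => inputArray.map (fun b => altOneDiff a b))) last rest = true
        ↔ Chainable (inputArray.getD last "") (rest.map (fun k => inputArray.getD k ""))) by
    exact fun rest => H rest.length rest le_rfl
  intro n
  induction n with
  | zero =>
    intro rest hlen hnd hbnd last hlast
    have : rest = [] := List.length_eq_zero_iff.mp (Nat.le_zero.mp hlen)
    subst this
    rw [altReach.eq_def]
    simp [chainable_nil]
  | succ n IH =>
    intro rest hlen hnd hbnd last hlast
    rw [altReach.eq_def]
    by_cases hemp : rest.isEmpty
    · simp [List.isEmpty_iff.mp hemp, chainable_nil]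
    · have hne : rest ≠ [] := by simpa [List.isEmpty_iff] using hemp
      have hne' : rest.map (fun k => inputArray.getD k "") ≠ [] := by
        simpa using hne
      rw [if_neg hemp, chainable_iff_step _ _ hne', List.any_eq_true]
      constructor
      · rintro ⟨⟨j, hmem⟩, -, hval⟩
        rw [adj_entry inputArray last j hlast (hbnd j hmem)] at hval
        by_cases hod : pvOneDiff (inputArray.getD last "") (inputArray.getD j "") = true
        · rw [if_pos hod, filter_ne_eq_erase hnd j hmem] at hval
          have hle : (rest.erase j).length ≤ n := by
            have := List.length_erase_add_one hmem
            omega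
          have hrec := (IH (rest.erase j) hle
            (hnd.erase j) (fun k hk => hbnd k (List.mem_of_mem_erase hk))
            j (hbnd j hmem)).mp hval
          refine ⟨inputArray.getD j "", List.mem_map_of_mem hmem, hod, ?_⟩
          have hperm : ((rest.map (fun k => inputArray.getD k "")).erase (inputArray.getD j ""))
              |>.Perm ((rest.erase j).map (fun k => inputArray.getD k "")) := by
            have h1 : (rest.map (fun k => inputArray.getD k "")).Perm
                (inputArray.getD j "" :: (rest.erase j).map (fun k => inputArray.getD k "")) := by
              simpa using (List.perm_cons_erase hmem).map (fun k => inputArray.getD k "")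
            simpa using h1.erase (inputArray.getD j "")
          exact (chainable_perm hperm).mpr hrec
        · rw [if_neg hod] at hval; exact absurd hval (by simp)
      · rintro ⟨y, hy, hxy, hch⟩
        obtain ⟨j, hmem, rfl⟩ := List.mem_map.mp hy
        refine ⟨⟨j, hmem⟩, List.mem_attach _ _, ?_⟩
        rw [adj_entry inputArray last j hlast (hbnd j hmem), if_pos hxy,
          filter_ne_eq_erase hnd j hmem]
        have hle : (rest.erase j).length ≤ n := by
          have := List.length_erase_add_one hmem
          omega
        refine (IH (rest.erase j) hle
          (hnd.erase j) (fun k hk => hbnd k (List.mem_of_mem_erase hk))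
          j (hbnd j hmem)).mpr ?_
        have hperm : ((rest.map (fun k => inputArray.getD k "")).erase (inputArray.getD j ""))
            |>.Perm ((rest.erase j).map (fun k => inputArray.getD k "")) := by
          have h1 : (rest.map (fun k => inputArray.getD k "")).Perm
              (inputArray.getD j "" :: (rest.erase j).map (fun k => inputArray.getD k "")) := by
            simpa using (List.perm_cons_erase hmem).map (fun k => inputArray.getD k "")
          simpa using h1.erase (inputArray.getD j "")
        exact (chainable_perm hperm).mp hch

-- the index set rest_i = range n \ {i}, mapped through the array, is A's pool for start i
theorem map_filter_range (l : List String) (i : Nat) (hi : i < l.length) :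
    ((List.range l.length).filter (fun k => k ≠ i)).map (fun k => l.getD k "")
      = l.take i ++ l.drop (i + 1) := by
  have hsplit : List.range l.length
      = List.range' 0 i ++ List.range' i (l.length - i) := by
    rw [List.range_eq_range']
    have h := List.range'_append (s := 0) (m := i) (n := l.length - i) (step := 1)
    simp only [Nat.zero_add, Nat.one_mul] at h
    rw [h]
    congr 1
    omega
  have hstep : List.range' i (l.length - i) = i :: List.range' (i + 1) (l.length - i - 1) := by
    have h : l.length - i = (l.length - i - 1) + 1 := by omega
    rw [h, List.range'_succ]
    simp
  rw [hsplit, hstep, List.filter_append]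
  have h1 : (List.range' 0 i).filter (fun k => k ≠ i) = List.range' 0 i := by
    apply List.filter_eq_self.mpr
    intro a ha
    have := List.mem_range'_1.mp ha
    simp; omega
  have h2 : ((i :: List.range' (i + 1) (l.length - i - 1)).filter (fun k => k ≠ i))
      = List.range' (i + 1) (l.length - i - 1) := by
    rw [List.filter_cons]
    simp only [decide_eq_true_eq]
    rw [if_neg (by simp)]
    apply List.filter_eq_self.mpr
    intro a ha
    have := List.mem_range'_1.mp ha
    simp; omega
  rw [h1, h2, List.map_append]
  congr 1
  · apply List.ext_getElem
    · simp; omega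
    · intro k hk1 hk2
      simp only [List.getElem_map, List.getElem_range'] at *
      rw [List.getElem_take]
      rw [List.getD_eq_getElem?_getD, List.getElem?_eq_getElem (by simp at hk1; omega)]
      simp
  · apply List.ext_getElem
    · simp; omega
    · intro k hk1 hk2
      simp only [List.getElem_map, List.getElem_range'] at *
      rw [List.getElem_drop]
      rw [List.getD_eq_getElem?_getD, List.getElem?_eq_getElem (by simp at hk1; omega)]
      simp [Nat.add_comm]

theorem any_congr_mem' {α : Type} {l : List α} {f g : α → Bool}
    (h : ∀ x ∈ l, f x = g x) : l.any f = l.any g := by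
  induction l with
  | nil => rfl
  | cons a l ih =>
    simp only [List.any_cons]
    rw [h a (List.mem_cons_self ..), ih (fun x hx => h x (List.mem_cons_of_mem a hx))]

-- ===== VERDICT (by name: the statement is the Claim_ definition above) =====
theorem solution_spec : Claim_equal_solution := by
  intro inputArray _
  unfold Spec_solution solution solution_alt
  apply any_congr_mem'
  intro i hi
  have hi' : i < inputArray.length := List.mem_range.mp hi
  have hgetA : PySem.List.pyGet? inputArray (i : Int) = some inputArray[i] := by
    rw [PySem.List.pyGet?_natCast, List.getElem?_eq_getElem hi']
  have hgetL : PySem.List.pyGet? [((PySem.List.pyGet? inputArray (i : Int)).getD "")] (-1)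
      = some (inputArray.getD i "") := by
    rw [hgetA]
    simp [PySem.List.pyGet?_neg_one, List.getD_eq_getElem?_getD, List.getElem?_eq_getElem hi']
  have hslice : PySem.List.slice inputArray (some 0) (some (i : Int)) ++
      PySem.List.slice inputArray (some ((i : Int) + 1)) none
      = inputArray.take i ++ inputArray.drop (i + 1) := by
    rw [PySem.List.slice_zero_start, PySem.List.slice_to_natCast]
    have : ((i : Int) + 1) = ((i + 1 : Nat) : Int) := by push_cast; ring
    rw [this, PySem.List.slice_from_natCast]
  have hA := arrange_iff (inputArray.take i ++ inputArray.drop (i + 1))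
    [((PySem.List.pyGet? inputArray (i : Int)).getD "")] (inputArray.getD i "") hgetL
  have hB := reach_iff inputArray ((List.range inputArray.length).filter (fun k => k ≠ i))
    (List.Nodup.filter _ (List.nodup_range))
    (fun k hk => List.mem_range.mp (List.mem_of_mem_filter hk))
    i hi'
  rw [map_filter_range inputArray i hi'] at hB
  rw [hslice]
  have := hA.trans hB.symm
  exact Bool.coe_iff_coe.mp this
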